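-- pv_equiv track=rewrite | github.com/f1lem0n/find-biomotif | finder.py | motifcaps
-- ===== SOURCE A (Python) =====
-- def motifcaps(seq, idxs, motif):
--
--     '''Capitalizes all motif apearances in seq and returns string with capped
--     motif substrings.
--
--     (idxs) - List of indices of all motif appearances in seq.'''
--
--     seq_capped = ''
--
--     for idx, i in enumerate(seq):
--         if idx in idxs:
--             seq_capped += seq[idx:idx + len(motif)].upper()
--         else:
--             seq_capped += seq[idx]
--
--     return seq_capped
-- ===== SOURCE B (Python) =====
-- def motifcaps(seq, idxs, motif):
--     chars = list(seq)
--     n = len(seq)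
--     m = len(motif)
--     for idx in idxs:
--         if 0 <= idx < n:
--             chars[idx] = seq[idx:idx + m].upper()
--     return ''.join(chars)
-- ===== Notes on version B (the rewrite author's own statement) =====
-- stated objective: faster
-- what changed: A scans every position of seq and tests 'idx in idxs' (a list scan) at each; B instead scatter-updates a character list only at the in-range indices of idxs and joins once, removing the per-position membership scan.
import Mathlib
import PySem

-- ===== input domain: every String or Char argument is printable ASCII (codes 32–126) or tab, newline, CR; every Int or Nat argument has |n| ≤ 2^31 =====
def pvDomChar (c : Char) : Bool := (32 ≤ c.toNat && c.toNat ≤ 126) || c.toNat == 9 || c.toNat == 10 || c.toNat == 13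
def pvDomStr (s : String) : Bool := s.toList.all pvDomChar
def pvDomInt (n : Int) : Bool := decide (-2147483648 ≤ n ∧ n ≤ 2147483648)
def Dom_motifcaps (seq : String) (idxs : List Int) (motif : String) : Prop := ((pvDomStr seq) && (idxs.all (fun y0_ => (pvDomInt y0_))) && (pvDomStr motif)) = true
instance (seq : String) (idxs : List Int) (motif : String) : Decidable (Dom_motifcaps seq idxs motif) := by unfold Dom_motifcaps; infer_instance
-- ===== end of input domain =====

-- B replaces A's per-position scan of seq (with an `idx in idxs` list test at every
-- position) by a single scatter-update over idxs into a character list, then one join.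


-- ===== PORT A =====
-- for idx, i in enumerate(seq): append the uppercased slice when idx in idxs, else the char
def motifcaps (seq : String) (idxs : List Int) (motif : String) : String :=
  let l := seq.toList
  let acc := (PySem.List.enumerate l 0).foldl
    (fun acc p =>
      if p.1 ∈ idxs then
        acc ++ PySem.Chars.upper (PySem.Chars.slice l (some p.1) (some (p.1 + PySem.Str.len motif)))
      else
        acc ++ [p.2]) []
  String.ofList acc

-- ===== PORT B =====
-- chars = list(seq); for idx in idxs: if 0 <= idx < n: chars[idx] = seq[idx:idx+m].upper(); ''.join(chars)
def motifcaps_alt (seq : String) (idxs : List Int) (motif : String) : String :=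
  let l := seq.toList
  let n := l.length
  let m := PySem.Str.len motif
  let chars0 : List (List Char) := l.map (fun c => [c])
  let chars := idxs.foldl
    (fun cs idx =>
      if 0 ≤ idx ∧ idx < (n : Int) then
        cs.set idx.toNat (PySem.Chars.upper (PySem.Chars.slice l (some idx) (some (idx + m))))
      else cs) chars0
  String.ofList chars.flatten

-- ===== PRECONDITION & SPEC =====
def Spec_motifcaps (seq : String) (idxs : List Int) (motif : String) (out : String) : Prop := out = motifcaps_alt seq idxs motif
instance (seq : String) (idxs : List Int) (motif : String) (out : String) : Decidable (Spec_motifcaps seq idxs motif out) := by unfold Spec_motifcaps; infer_instance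

-- ===== CLAIM (what is proved, stated in full; the proofs are below) =====
def Claim_equal_motifcaps : Prop := ∀ (seq : String) (idxs : List Int) (motif : String), Dom_motifcaps seq idxs motif → Spec_motifcaps seq idxs motif (motifcaps seq idxs motif)

-- ===== LEMMAS AND PROOFS =====

theorem pv_foldl_append {α : Type} (f : α → List Char) :
    ∀ (e : List α) (a : List Char),
      e.foldl (fun acc p => acc ++ f p) a = a ++ (e.map f).flatten := by
  intro e
  induction e with
  | nil => simp
  | cons x xs ih => intro a; simp [List.foldl_cons, ih]

theorem pv_bfold_length (n : Nat) (v : Int → List Char) :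
    ∀ (idxs : List Int) (cs : List (List Char)),
      (idxs.foldl (fun cs idx => if 0 ≤ idx ∧ idx < (n : Int) then cs.set idx.toNat (v idx) else cs) cs).length = cs.length := by
  intro idxs
  induction idxs with
  | nil => simp
  | cons x xs ih =>
    intro cs
    simp only [List.foldl_cons]
    split
    · rw [ih]; simp
    · exact ih cs

-- after the scatter fold, slot i holds v i when (i : Int) ∈ idxs and the original entry otherwise
theorem pv_bfold_get? (n : Nat) (v : Int → List Char) :
    ∀ (idxs : List Int) (cs : List (List Char)), cs.length = n →
      ∀ (i : Nat), i < n →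
      (idxs.foldl (fun cs idx => if 0 ≤ idx ∧ idx < (n : Int) then cs.set idx.toNat (v idx) else cs) cs)[i]?
        = (if (i : Int) ∈ idxs then some (v (i : Int)) else cs[i]?) := by
  intro idxs
  induction idxs with
  | nil => intro cs _ i _; simp
  | cons x xs ih =>
    intro cs hlen i hi
    simp only [List.foldl_cons]
    by_cases hx : 0 ≤ x ∧ x < (n : Int)
    · rw [if_pos hx]
      rw [ih _ (by simp [hlen]) i hi]
      by_cases hmem : (i : Int) ∈ xs
      · simp [hmem]
      · by_cases heq : (i : Int) = x
        · have hnat : x.toNat = i := by omega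
          rw [if_neg hmem, if_pos (by simp [heq]), hnat,
            List.getElem?_set_self (by omega), ← heq]
        · have : (i : Int) ∉ x :: xs := by
            intro h; rcases List.mem_cons.mp h with h | h
            · exact heq h
            · exact hmem h
          rw [if_neg hmem, if_neg this, List.getElem?_set_ne (by omega)]
    · rw [if_neg hx]
      rw [ih _ hlen i hi]
      by_cases hmem : (i : Int) ∈ xs
      · simp [hmem]
      · have heq : (i : Int) ≠ x := by
          intro h; apply hx; constructor <;> omega
        have : (i : Int) ∉ x :: xs := by
          intro h; rcases List.mem_cons.mp h with h | h
          · exact heq h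
          · exact hmem h
        rw [if_neg hmem, if_neg this]

-- ===== VERDICT (by name: the statement is the Claim_ definition above) =====
theorem motifcaps_spec : Claim_equal_motifcaps := by
  intro seq idxs motif _
  unfold Spec_motifcaps motifcaps motifcaps_alt
  simp only []
  set l := seq.toList with hl
  set m := PySem.Str.len motif with hm
  set v : Int → List Char := fun idx =>
    PySem.Chars.upper (PySem.Chars.slice l (some idx) (some (idx + m))) with hv
  set f : (Int × Char) → List Char := fun p => if p.1 ∈ idxs then v p.1 else [p.2] with hf
  have hshape : (fun (acc : List Char) (p : Int × Char) =>
      if p.1 ∈ idxs then acc ++ v p.1 else acc ++ [p.2])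
      = fun acc p => acc ++ f p := by
    funext acc p; simp only [hf]; split <;> rfl
  rw [hshape, pv_foldl_append]
  have key : List.map f (PySem.List.enumerate l)
      = idxs.foldl (fun cs idx => if 0 ≤ idx ∧ idx < (l.length : Int) then
          cs.set idx.toNat (v idx) else cs) (l.map fun c => [c]) := by
    apply List.ext_getElem?
    intro i
    by_cases hi : i < l.length
    · rw [pv_bfold_get? l.length v idxs (l.map fun c => [c]) (by simp) i hi]
      simp only [List.getElem?_map, PySem.List.getElem?_enumerate,
        List.getElem?_eq_getElem hi, Option.map_some, hf, zero_add]
      split <;> simp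
    · have h1 : (List.map f (PySem.List.enumerate l 0))[i]? = none := by
        rw [List.getElem?_eq_none]
        simp [PySem.List.length_enumerate]; omega
      have h2 : _ = _ := pv_bfold_length l.length v idxs (l.map fun c => [c])
      rw [h1, Eq.comm, List.getElem?_eq_none]
      rw [h2]; simp; omega
  rw [List.nil_append, key]
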